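-- pv_equiv track=rewrite | github.com/NicolasKs/Solutions_Pyhon101_HackBulgaria | week08/Graphs/Frogs_DFS.py | check_possibilites
-- ===== SOURCE A (Python) =====
-- import copy
--
-- def check_possibilites(swamp, end_swamp):
--     queue = []
--     directions = [left, left2, right, right2]
--
--     queue.append([swamp])
--
--     while queue:
--         new = []
--         path = queue.pop()
--         node = path[-1]
--
--         if node == end_swamp:
--             return path
--
--         for way in directions:
--             temp = copy.deepcopy(node)
--             pad_pos = temp.index('_')
--             res = way(temp, pad_pos)
--
--             if res is not None:
--                 new.append(res)
--
--         for val in new: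
--             comb = path + [val]
--             queue.append(comb)
--
-- def left(temp, pad_pos):
--     if temp[pad_pos - 1] == '>' and (pad_pos - 1) > -1:
--         temp[pad_pos] = temp[pad_pos - 1]
--         temp[pad_pos - 1] = '_'
--         return temp
--
-- def left2(temp, pad_pos):
--     if temp[pad_pos - 2] == '>' and (pad_pos - 2) > -1:
--         temp[pad_pos] = temp[pad_pos - 2]
--         temp[pad_pos - 2] = '_'
--         return temp
--
-- def right(temp, pad_pos):
--     if (pad_pos + 1) <= len(temp) - 1:
--         if temp[pad_pos + 1] == '<':
--             temp[pad_pos] = temp[pad_pos + 1]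
--             temp[pad_pos + 1] = '_'
--             return temp
--
-- def right2(temp, pad_pos):
--     if (pad_pos + 2) <= len(temp) - 1:
--         if temp[pad_pos + 2] == '<':
--             temp[pad_pos] = temp[pad_pos + 2]
--             temp[pad_pos + 2] = '_'
--             return temp
-- ===== SOURCE B (Python) =====
-- def check_possibilites(swamp, end_swamp):
--     def step(board, d):
--         i = board.index('_')
--         j = i + d
--         frog = '<' if d > 0 else '>'
--         if 0 <= j < len(board) and board[j] == frog:
--             nb = list(board)
--             nb[i], nb[j] = nb[j], nb[i]
--             return nb
--         return None
--
--     def dfs(path):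
--         node = path[-1]
--         if node == end_swamp:
--             return path
--         for d in (2, 1, -2, -1):
--             nb = step(node, d)
--             if nb is not None:
--                 res = dfs(path + [nb])
--                 if res is not None:
--                     return res
--         return None
--
--     return dfs([swamp])
-- ===== Notes on version B (the rewrite author's own statement) =====
-- stated objective: simpler
-- what changed: The explicit-stack DFS that deep-copies the board and runs four separate move helpers is rewritten as a short recursive depth-first search with one generic step(board,d) function, visiting the four moves in reverse push order (2,1,-2,-1) so it returns the identical path.
import Mathlib
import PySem

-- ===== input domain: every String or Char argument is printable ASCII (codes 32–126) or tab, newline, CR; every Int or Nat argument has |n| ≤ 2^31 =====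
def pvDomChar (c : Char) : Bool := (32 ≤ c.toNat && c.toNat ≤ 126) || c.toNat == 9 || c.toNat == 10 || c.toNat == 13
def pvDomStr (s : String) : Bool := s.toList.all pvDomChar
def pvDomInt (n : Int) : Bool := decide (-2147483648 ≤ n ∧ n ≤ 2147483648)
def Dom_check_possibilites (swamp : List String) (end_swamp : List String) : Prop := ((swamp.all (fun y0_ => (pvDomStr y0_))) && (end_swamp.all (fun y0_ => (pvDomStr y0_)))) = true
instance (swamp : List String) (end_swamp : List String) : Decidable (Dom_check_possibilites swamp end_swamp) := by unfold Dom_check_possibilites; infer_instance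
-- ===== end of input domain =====

-- B re-implements A's explicit-stack DFS as a recursive DFS with one generic step function,
-- visiting moves in reverse push order so the returned path is identical (objective: simpler).

-- Termination measure, shared by both ports: each frog move strictly increases the board
-- potential pvPot (bounded by n*(n-1)), so 5^(n*n - pvPot) strictly shrinks along a path
-- and the summed stack weight pvQW strictly shrinks at every loop iteration.
def pvWt (n : Nat) (s : String) (i : Nat) : Nat :=
  if s = ">" then i else if s = "<" then n - 1 - i else 0

def pvPot (b : List String) : Nat :=
  ∑ i ∈ Finset.range b.length, pvWt b.length (b.getD i "") i

def pvBW (b : List String) : Nat := 5 ^ (b.length * b.length - pvPot b)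

def pvPW (p : List (List String)) : Nat := pvBW (p.getLastD [])

def pvQW (q : List (List (List String))) : Nat := (q.map pvPW).sum

theorem pvPot_le (b : List String) : pvPot b ≤ b.length * (b.length - 1) := by
  unfold pvPot
  calc ∑ i ∈ Finset.range b.length, pvWt b.length (b.getD i "") i
      ≤ ∑ i ∈ Finset.range b.length, (b.length - 1) := by
        apply Finset.sum_le_sum
        intro i hi
        have : i < b.length := Finset.mem_range.mp hi
        unfold pvWt; split_ifs <;> omega
    _ = b.length * (b.length - 1) := by
        simp [Finset.sum_const, Finset.card_range]

theorem pv_getD_set_eq {α : Type} [Inhabited α] (l : List α) (i : Nat) (v d : α) (h : i < l.length) :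
    (l.set i v).getD i d = v := by
  simp [List.getD_eq_getElem?_getD, h]

theorem pv_getD_set_ne {α : Type} [Inhabited α] (l : List α) (i k : Nat) (v d : α) (h : i ≠ k) :
    (l.set i v).getD k d = l.getD k d := by
  simp [List.getD_eq_getElem?_getD, h]

theorem pvPot_swap (b : List String) (p j : Nat) (frog : String)
    (hp : p < b.length) (hj : j < b.length) (hne : p ≠ j)
    (hpv : b.getD p "" = "_") :
    pvPot ((b.set p frog).set j "_") + pvWt b.length (b.getD j "") j
      = pvPot b + pvWt b.length frog p := by
  have hlen : ((b.set p frog).set j "_").length = b.length := by simp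
  have hunder : "_" ≠ ">" ∧ "_" ≠ "<" := by constructor <;> decide
  unfold pvPot
  rw [hlen]
  have hpmem : p ∈ Finset.range b.length := Finset.mem_range.mpr hp
  have hjmem : j ∈ (Finset.range b.length).erase p := by
    simp [Finset.mem_erase, Finset.mem_range, hj, Ne.symm hne]
  set c := (b.set p frog).set j "_" with hc
  have f_split : ∀ (g : Nat → Nat),
      ∑ i ∈ Finset.range b.length, g i
        = g p + (g j + ∑ i ∈ ((Finset.range b.length).erase p).erase j, g i) := by
    intro g
    rw [← Finset.add_sum_erase _ g hpmem, ← Finset.add_sum_erase _ g hjmem]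
  rw [f_split (fun i => pvWt b.length (c.getD i "") i),
      f_split (fun i => pvWt b.length (b.getD i "") i)]
  have hcp : c.getD p "" = frog := by
    rw [hc, pv_getD_set_ne _ _ _ _ _ (Ne.symm hne), pv_getD_set_eq _ _ _ _ hp]
  have hcj : c.getD j "" = "_" := by
    rw [hc, pv_getD_set_eq]; simpa using hj
  have hrest : ∑ i ∈ ((Finset.range b.length).erase p).erase j,
      pvWt b.length (c.getD i "") i
      = ∑ i ∈ ((Finset.range b.length).erase p).erase j,
      pvWt b.length (b.getD i "") i := by
    apply Finset.sum_congr rfl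
    intro i hi
    have hip : i ≠ p := Finset.ne_of_mem_erase (Finset.mem_of_mem_erase hi)
    have hij : i ≠ j := Finset.ne_of_mem_erase hi
    rw [hc, pv_getD_set_ne _ _ _ _ _ (Ne.symm hij), pv_getD_set_ne _ _ _ _ _ (Ne.symm hip)]
  rw [hcp, hcj, hrest, hpv]
  have hz : pvWt b.length "_" j = 0 := by unfold pvWt; simp [hunder.1, hunder.2]
  have hz' : pvWt b.length "_" p = 0 := by unfold pvWt; simp [hunder.1, hunder.2]
  rw [hz, hz']
  omega

-- c.length = node.length, pvPot strictly increases, and the bound needed by the weights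
theorem pvChild (node c : List String) (p j : Nat) (frog : String)
    (hp : p < node.length) (hj : j < node.length) (hne : p ≠ j)
    (hpv : node.getD p "" = "_") (hjv : node.getD j "" = frog)
    (hwt : pvWt node.length frog j < pvWt node.length frog p)
    (hc : c = (node.set p frog).set j "_") :
    5 * pvBW c ≤ pvBW node := by
  have hswap := pvPot_swap node p j frog hp hj hne hpv
  rw [← hc] at hswap
  rw [hjv] at hswap
  have hclen : c.length = node.length := by rw [hc]; simp
  have hcbound : pvPot c ≤ node.length * (node.length - 1) := by
    have := pvPot_le c; rwa [hclen] at this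
  have hL : 1 ≤ node.length := by omega
  have hmul : node.length * (node.length - 1) + node.length = node.length * node.length := by
    have h1 : node.length - 1 + 1 = node.length := Nat.succ_pred_eq_of_pos hL
    calc node.length * (node.length - 1) + node.length
        = node.length * ((node.length - 1) + 1) := by ring
      _ = node.length * node.length := by rw [h1]
  have hinc : pvPot node < pvPot c := by omega
  have hexp : node.length * node.length - pvPot c + 1 ≤ node.length * node.length - pvPot node := by
    omega
  unfold pvBW
  rw [hclen]
  calc 5 * 5 ^ (node.length * node.length - pvPot c)
      = 5 ^ (node.length * node.length - pvPot c + 1) := by ring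
    _ ≤ 5 ^ (node.length * node.length - pvPot node) :=
        Nat.pow_le_pow_right (by norm_num) hexp

-- ===== PORT A =====
-- left/left2/right/right2 as in the Python; temp[k] via PySem.List.pyGet? / pySetD.
def pvLeft (temp : List String) (pad_pos : Int) : Option (List String) :=
  match PySem.List.pyGet? temp (pad_pos - 1) with
  | none => none     -- IndexError (empty temp only); unreachable when pad_pos comes from index
  | some v =>
    if v = ">" ∧ pad_pos - 1 > -1 then
      some (PySem.List.pySetD (PySem.List.pySetD temp pad_pos v) (pad_pos - 1) "_")
    else none

def pvLeft2 (temp : List String) (pad_pos : Int) : Option (List String) :=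
  match PySem.List.pyGet? temp (pad_pos - 2) with
  | none => none     -- IndexError on the one-element board; excluded by Pre_
  | some v =>
    if v = ">" ∧ pad_pos - 2 > -1 then
      some (PySem.List.pySetD (PySem.List.pySetD temp pad_pos v) (pad_pos - 2) "_")
    else none

def pvRight (temp : List String) (pad_pos : Int) : Option (List String) :=
  if pad_pos + 1 ≤ (temp.length : Int) - 1 then
    match PySem.List.pyGet? temp (pad_pos + 1) with
    | none => none   -- unreachable: index checked in range
    | some v =>
      if v = "<" then
        some (PySem.List.pySetD (PySem.List.pySetD temp pad_pos v) (pad_pos + 1) "_")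
      else none
  else none

def pvRight2 (temp : List String) (pad_pos : Int) : Option (List String) :=
  if pad_pos + 2 ≤ (temp.length : Int) - 1 then
    match PySem.List.pyGet? temp (pad_pos + 2) with
    | none => none   -- unreachable: index checked in range
    | some v =>
      if v = "<" then
        some (PySem.List.pySetD (PySem.List.pySetD temp pad_pos v) (pad_pos + 2) "_")
      else none
  else none

-- the inner 'for way in directions' loop building 'new' (deepcopy is identity on values)
def pvMovesA (node : List String) : List (List String) :=
  [pvLeft, pvLeft2, pvRight, pvRight2].foldl
    (fun new way =>
      match PySem.List.index? node "_" with
      | none => new          -- ValueError; unreachable under Pre_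
      | some pad_pos =>
        match way node (pad_pos : Int) with
        | some res => new ++ [res]
        | none => new) []

theorem pvWt_gtS0 (n k : Nat) : pvWt n ">" k = k := by
  unfold pvWt; rw [if_pos rfl]

theorem pvWt_ltS0 (n k : Nat) : pvWt n "<" k = n - 1 - k := by
  unfold pvWt; rw [if_neg (by decide), if_pos rfl]

theorem pvBW_posA (b : List String) : 0 < pvBW b := by
  unfold pvBW; positivity

theorem pv_getD_eq_getElemA (l : List String) (i : Nat) (h : i < l.length) :
    l.getD i "" = l[i] := by
  simp [List.getD_eq_getElem?_getD, List.getElem?_eq_getElem h]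

theorem pvSwap_bw (node c : List String) (p q : Nat) (frog : String)
    (hp : p < node.length) (hq : q < node.length)
    (hpv : node.getD p "" = "_") (hqv : node[q] = frog)
    (hwt : pvWt node.length frog q < pvWt node.length frog p)
    (hfr : frog = ">" ∨ frog = "<")
    (hc : c = (node.set p frog).set q "_") : 5 * pvBW c ≤ pvBW node := by
  have hne : p ≠ q := by
    intro he
    rw [pv_getD_eq_getElemA node p hp] at hpv
    subst he
    rw [hpv] at hqv
    rcases hfr with h | h <;> rw [← hqv] at h <;> exact absurd h (by decide)
  exact pvChild node c p q frog hp hq hne hpv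
    (by rw [pv_getD_eq_getElemA node q hq]; exact hqv) hwt hc

theorem pvLeft_bw (node c : List String) (pad : Nat)
    (hpad : pad < node.length) (hval : node.getD pad "" = "_")
    (h : pvLeft node (pad : Int) = some c) : 5 * pvBW c ≤ pvBW node := by
  unfold pvLeft at h
  by_cases hge : 1 ≤ pad
  · have hlt : pad - 1 < node.length := by omega
    rw [show (pad : Int) - 1 = ((pad - 1 : Nat) : Int) by omega,
        PySem.List.pyGet?_natCast, List.getElem?_eq_getElem hlt] at h
    dsimp only at h
    by_cases hv : node[pad - 1] = ">"
    · rw [if_pos ⟨hv, by omega⟩] at h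
      refine pvSwap_bw node c pad (pad - 1) ">" hpad hlt hval hv ?_ (Or.inl rfl) ?_
      · rw [pvWt_gtS0, pvWt_gtS0]; omega
      · have h2 := (Option.some.inj h).symm
        rw [h2]
        simp only [PySem.List.pySetD_natCast, hv]
    · rw [if_neg (by rintro ⟨hv2, -⟩; exact hv hv2)] at h
      exact absurd h (by simp)
  · cases hg : PySem.List.pyGet? node ((pad : Int) - 1) with
    | none => rw [hg] at h; exact absurd h (by simp)
    | some v =>
      rw [hg] at h
      dsimp only at h
      rw [if_neg (by rintro ⟨-, h2⟩; omega)] at h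
      exact absurd h (by simp)

theorem pvLeft2_bw (node c : List String) (pad : Nat)
    (hpad : pad < node.length) (hval : node.getD pad "" = "_")
    (h : pvLeft2 node (pad : Int) = some c) : 5 * pvBW c ≤ pvBW node := by
  unfold pvLeft2 at h
  by_cases hge : 2 ≤ pad
  · have hlt : pad - 2 < node.length := by omega
    rw [show (pad : Int) - 2 = ((pad - 2 : Nat) : Int) by omega,
        PySem.List.pyGet?_natCast, List.getElem?_eq_getElem hlt] at h
    dsimp only at h
    by_cases hv : node[pad - 2] = ">"
    · rw [if_pos ⟨hv, by omega⟩] at h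
      refine pvSwap_bw node c pad (pad - 2) ">" hpad hlt hval hv ?_ (Or.inl rfl) ?_
      · rw [pvWt_gtS0, pvWt_gtS0]; omega
      · have h2 := (Option.some.inj h).symm
        rw [h2]
        simp only [PySem.List.pySetD_natCast, hv]
    · rw [if_neg (by rintro ⟨hv2, -⟩; exact hv hv2)] at h
      exact absurd h (by simp)
  · cases hg : PySem.List.pyGet? node ((pad : Int) - 2) with
    | none => rw [hg] at h; exact absurd h (by simp)
    | some v =>
      rw [hg] at h
      dsimp only at h
      rw [if_neg (by rintro ⟨-, h2⟩; omega)] at h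
      exact absurd h (by simp)

theorem pvRight_bw (node c : List String) (pad : Nat)
    (hpad : pad < node.length) (hval : node.getD pad "" = "_")
    (h : pvRight node (pad : Int) = some c) : 5 * pvBW c ≤ pvBW node := by
  unfold pvRight at h
  by_cases hle : (pad : Int) + 1 ≤ (node.length : Int) - 1
  · rw [if_pos hle] at h
    have hlt : pad + 1 < node.length := by omega
    rw [show (pad : Int) + 1 = ((pad + 1 : Nat) : Int) by omega,
        PySem.List.pyGet?_natCast, List.getElem?_eq_getElem hlt] at h
    dsimp only at h
    by_cases hv : node[pad + 1] = "<"
    · rw [if_pos hv] at h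
      refine pvSwap_bw node c pad (pad + 1) "<" hpad hlt hval hv ?_ (Or.inr rfl) ?_
      · rw [pvWt_ltS0, pvWt_ltS0]; omega
      · have h2 := (Option.some.inj h).symm
        rw [h2]
        simp only [PySem.List.pySetD_natCast, hv]
    · rw [if_neg hv] at h
      exact absurd h (by simp)
  · rw [if_neg hle] at h
    exact absurd h (by simp)

theorem pvRight2_bw (node c : List String) (pad : Nat)
    (hpad : pad < node.length) (hval : node.getD pad "" = "_")
    (h : pvRight2 node (pad : Int) = some c) : 5 * pvBW c ≤ pvBW node := by
  unfold pvRight2 at h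
  by_cases hle : (pad : Int) + 2 ≤ (node.length : Int) - 1
  · rw [if_pos hle] at h
    have hlt : pad + 2 < node.length := by omega
    rw [show (pad : Int) + 2 = ((pad + 2 : Nat) : Int) by omega,
        PySem.List.pyGet?_natCast, List.getElem?_eq_getElem hlt] at h
    dsimp only at h
    by_cases hv : node[pad + 2] = "<"
    · rw [if_pos hv] at h
      refine pvSwap_bw node c pad (pad + 2) "<" hpad hlt hval hv ?_ (Or.inr rfl) ?_
      · rw [pvWt_ltS0, pvWt_ltS0]; omega
      · have h2 := (Option.some.inj h).symm
        rw [h2]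
        simp only [PySem.List.pySetD_natCast, hv]
    · rw [if_neg hv] at h
      exact absurd h (by simp)
  · rw [if_neg hle] at h
    exact absurd h (by simp)

theorem pvMovesA_sum (node : List String) : ((pvMovesA node).map pvBW).sum < pvBW node := by
  have hB := pvBW_posA node
  cases hidx : PySem.List.index? node "_" with
  | none =>
    have hidx' : List.idxOf? "_" node = none := by
      rw [← PySem.List.index?_eq_idxOf?]; exact hidx
    simp [pvMovesA, PySem.List.index?_eq_idxOf?, hidx']
    omega
  | some pad =>
    have hidx' : List.idxOf? "_" node = some pad := by
      rw [← PySem.List.index?_eq_idxOf?]; exact hidx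
    obtain ⟨hpad, hpv, -⟩ := PySem.List.getElem_of_index?_eq_some hidx
    have hval : node.getD pad "" = "_" := by
      rw [pv_getD_eq_getElemA node pad hpad]; exact hpv
    rcases h1 : pvLeft node (pad : Int) with - | c1 <;>
    rcases h2 : pvLeft2 node (pad : Int) with - | c2 <;>
    rcases h3 : pvRight node (pad : Int) with - | c3 <;>
    rcases h4 : pvRight2 node (pad : Int) with - | c4 <;>
    [skip; skip; skip; skip; skip; skip; skip; skip;
     skip; skip; skip; skip; skip; skip; skip; skip] <;>
    · first
      | (simp only [pvMovesA, PySem.List.index?_eq_idxOf?, hidx', h1, h2, h3, h4, List.foldl, List.map,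
          List.sum_cons, List.sum_nil, List.nil_append, List.cons_append]
         try have b1 := pvLeft_bw node c1 pad hpad hval h1
         try have b2 := pvLeft2_bw node c2 pad hpad hval h2
         try have b3 := pvRight_bw node c3 pad hpad hval h3
         try have b4 := pvRight2_bw node c4 pad hpad hval h4
         omega)

theorem pvPW_concat (path : List (List String)) (c : List String) :
    pvPW (path ++ [c]) = pvBW c := by
  simp [pvPW]

theorem pvPW_of_last (path : List (List String)) (node : List String)
    (h : PySem.List.pyGet? path (-1) = some node) : pvPW path = pvBW node := by
  rw [PySem.List.pyGet?_neg_one] at h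
  unfold pvPW
  rw [List.getLastD_eq_getLast?, h]
  rfl

theorem pvQW_append (a b : List (List (List String))) :
    pvQW (a ++ b) = pvQW a + pvQW b := by
  simp [pvQW]

theorem pv_getLastD {α : Type} (l : List α) (h : l ≠ []) (d : α) :
    l.getLastD d = l.getLast h := by
  rw [List.getLastD_eq_getLast?, List.getLast?_eq_some_getLast]
  rfl

theorem pv_split {α : Type} (l : List α) (h : l ≠ []) (d : α) :
    l = l.dropLast ++ [l.getLastD d] := by
  conv_lhs => rw [← List.dropLast_append_getLast h]
  rw [pv_getLastD l h d]

theorem pvQW_children (path : List (List String)) (cs : List (List String)) :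
    pvQW (cs.map (fun val => path ++ [val])) = (cs.map pvBW).sum := by
  unfold pvQW
  rw [List.map_map]
  have : (pvPW ∘ fun val => path ++ [val]) = pvBW := by
    funext c
    exact pvPW_concat path c
  rw [this]

theorem pvQW_split (x : List (List String)) (xs : List (List (List String))) :
    pvQW (x :: xs) = pvQW (x :: xs).dropLast + pvPW ((x :: xs).getLastD []) := by
  conv_lhs => rw [pv_split (x :: xs) (by simp) []]
  rw [pvQW_append]
  simp [pvQW]

def pvALoop (end_swamp : List String) (queue : List (List (List String))) :
    Option (List (List String)) :=
  match hq : queue with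
  | [] => none
  | x :: xs =>
    let path := (x :: xs).getLastD []
    let rest := (x :: xs).dropLast
    match hn : PySem.List.pyGet? path (-1) with
    | none => pvALoop end_swamp rest      -- path[-1] on an empty path: A never creates one
    | some node =>
      if node = end_swamp then some path
      else pvALoop end_swamp (rest ++ (pvMovesA node).map (fun val => path ++ [val]))
termination_by pvQW queue
decreasing_by
  · have h1 := pvQW_split x xs
    have h2 : 0 < pvPW ((x :: xs).getLastD []) := pvBW_posA _
    omega
  · have h1 := pvQW_split x xs
    rw [pvQW_append, pvQW_children]
    have h2 := pvMovesA_sum node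
    have h3 := pvPW_of_last ((x :: xs).getLastD []) node hn
    omega

def check_possibilites (swamp : List String) (end_swamp : List String) :
    Option (List (List String)) :=
  pvALoop end_swamp ([] ++ [[swamp]])

-- ===== PORT B =====
def pvStep (board : List String) (d : Int) : Option (List String) :=
  match PySem.List.index? board "_" with
  | none => none       -- board.index('_') raises ValueError; unreachable under Pre_
  | some i =>
    let j : Int := (i : Int) + d
    let frog : String := if 0 < d then "<" else ">"
    if 0 ≤ j ∧ j < (board.length : Int) then
      match PySem.List.pyGet? board (i : Int), PySem.List.pyGet? board j with
      | some vi, some vj =>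
        if vj = frog then
          some (PySem.List.pySetD (PySem.List.pySetD board (i : Int) vj) j vi)
        else none
      | _, _ => none
    else none

theorem pv_getD_eq_getElem (l : List String) (i : Nat) (h : i < l.length) :
    l.getD i "" = l[i] := by
  simp [List.getD_eq_getElem?_getD, List.getElem?_eq_getElem h]

theorem pvBW_pos (b : List String) : 0 < pvBW b := by
  unfold pvBW; positivity

theorem pvWt_gtS (n k : Nat) : pvWt n ">" k = k := by
  unfold pvWt; rw [if_pos rfl]

theorem pvWt_ltS (n k : Nat) : pvWt n "<" k = n - 1 - k := by
  unfold pvWt; rw [if_neg (by decide), if_pos rfl]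

theorem pvStep_bw (node nb : List String) (d : Int) (h : pvStep node d = some nb) :
    pvBW nb < pvBW node := by
  unfold pvStep at h
  cases hidx : PySem.List.index? node "_" with
  | none => rw [hidx] at h; exact absurd h (by simp)
  | some i =>
    rw [hidx] at h
    obtain ⟨hi, hvi, -⟩ := PySem.List.getElem_of_index?_eq_some hidx
    simp only [] at h
    by_cases hj : 0 ≤ (i : Int) + d ∧ (i : Int) + d < (node.length : Int)
    · rw [if_pos hj] at h
      have hjn : ((i : Int) + d).toNat < node.length := by omega
      have hjc : (i : Int) + d = (((i : Int) + d).toNat : Int) := by omega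
      rw [PySem.List.pyGet?_natCast, List.getElem?_eq_getElem hi, hjc,
          PySem.List.pyGet?_natCast, List.getElem?_eq_getElem hjn] at h
      dsimp only at h
      generalize hq : ((i : Int) + d).toNat = q at hjc hjn h
      by_cases hv : node[q] = (if 0 < d then "<" else ">")
      · rw [if_pos hv] at h
        have hnb : nb = (node.set i (if 0 < d then "<" else ">")).set q "_" := by
          have h2 := (Option.some.inj h).symm
          rw [h2]
          simp only [PySem.List.pySetD_natCast, hvi, hv]
        have hne : i ≠ q := by
          intro he
          subst he
          rw [hvi] at hv
          split_ifs at hv <;> simp_all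
        have hqv : node.getD q "" = (if 0 < d then "<" else ">") := by
          rw [pv_getD_eq_getElem node q hjn]; exact hv
        have hwt : pvWt node.length (if 0 < d then "<" else ">") q
            < pvWt node.length (if 0 < d then "<" else ">") i := by
          by_cases hd : 0 < d
          · simp only [if_pos hd, pvWt_ltS]; omega
          · simp only [if_neg hd, pvWt_gtS]; omega
        have hiv : node.getD i "" = "_" := by
          rw [pv_getD_eq_getElem node i hi]; exact hvi
        have h5 := pvChild node nb i q (if 0 < d then "<" else ">") hi hjn hne
          hiv hqv hwt hnb
        have := pvBW_pos nb
        omega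
      · rw [if_neg hv] at h; exact absurd h (by simp)
    · rw [if_neg hj] at h; exact absurd h (by simp)

mutual
def pvDfs (end_swamp : List String) (path : List (List String)) :
    Option (List (List String)) :=
  match PySem.List.pyGet? path (-1) with
  | none => none       -- path[-1] on an empty path: never created
  | some node =>
    if node = end_swamp then some path
    else pvGo end_swamp path [2, 1, -2, -1]
termination_by (pvPW path, 5)
decreasing_by
  · exact Prod.Lex.right _ (by simp)

def pvGo (end_swamp : List String) (path : List (List String)) (ds : List Int) :
    Option (List (List String)) :=
  match ds with
  | [] => none
  | d :: rest =>
    match hn : PySem.List.pyGet? path (-1) with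
    | none => pvGo end_swamp path rest   -- unreachable
    | some node =>
      match hstep : pvStep node d with
      | none => pvGo end_swamp path rest
      | some nb =>
        match pvDfs end_swamp (path ++ [nb]) with
        | some r => some r
        | none => pvGo end_swamp path rest
termination_by (pvPW path, ds.length)
decreasing_by
  · exact Prod.Lex.right _ (by simp)
  · exact Prod.Lex.right _ (by simp)
  · refine Prod.Lex.left _ _ ?_
    rw [pvPW_concat, pvPW_of_last path node hn]
    exact pvStep_bw node nb d hstep
  · exact Prod.Lex.right _ (by simp)
end

def check_possibilites_alt (swamp : List String) (end_swamp : List String) :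
    Option (List (List String)) :=
  pvDfs end_swamp [swamp]

-- ===== PRECONDITION & SPEC =====
-- Pre_ excludes exactly the inputs where Python A raises: ValueError when '_' is not in
-- swamp (unless swamp == end_swamp, which returns before the lookup), and IndexError on the
-- one-element board ['_'] with end_swamp ≠ ['_'] (left2 reads temp[-2]).
def Pre_check_possibilites (swamp : List String) (end_swamp : List String) : Prop :=
  swamp = end_swamp ∨ ("_" ∈ swamp ∧ 2 ≤ swamp.length)

instance (swamp : List String) (end_swamp : List String) :
    Decidable (Pre_check_possibilites swamp end_swamp) := by
  unfold Pre_check_possibilites; infer_instance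

def pvWitness_check_possibilites : List String × List String :=
  ([">", "_", "<"], ["<", "_", ">"])

def Spec_check_possibilites (swamp : List String) (end_swamp : List String)
    (out : Option (List (List String))) : Prop :=
  out = check_possibilites_alt swamp end_swamp

instance (swamp : List String) (end_swamp : List String) (out : Option (List (List String))) :
    Decidable (Spec_check_possibilites swamp end_swamp out) := by
  unfold Spec_check_possibilites; infer_instance

-- ===== CLAIM (what is proved, stated in full; the proofs are below) =====
def Claim_equal_check_possibilites : Prop :=
  ∀ (swamp : List String) (end_swamp : List String),
    Dom_check_possibilites swamp end_swamp →
    Pre_check_possibilites swamp end_swamp →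
    Spec_check_possibilites swamp end_swamp (check_possibilites swamp end_swamp)

-- ===== LEMMAS AND PROOFS =====

theorem pvLeft_agree (node : List String) (pad : Nat)
    (hidx : PySem.List.index? node "_" = some pad) :
    pvLeft node (pad : Int) = pvStep node (-1) := by
  obtain ⟨hpad, hpv, -⟩ := PySem.List.getElem_of_index?_eq_some hidx
  unfold pvLeft pvStep
  rw [hidx]
  dsimp only
  rw [if_neg (by norm_num : ¬ (0:Int) < -1)]
  by_cases hge : 1 ≤ pad
  · rw [if_pos (⟨by omega, by omega⟩ : 0 ≤ (pad : Int) + -1 ∧ (pad : Int) + -1 < (node.length : Int))]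
    have hlt : pad - 1 < node.length := by omega
    rw [show (pad : Int) + -1 = ((pad - 1 : Nat) : Int) by omega,
        show (pad : Int) - 1 = ((pad - 1 : Nat) : Int) by omega,
        PySem.List.pyGet?_natCast, PySem.List.pyGet?_natCast,
        List.getElem?_eq_getElem hlt, List.getElem?_eq_getElem hpad]
    dsimp only
    by_cases hv : node[pad - 1] = ">"
    · rw [if_pos (⟨hv, by omega⟩ : _ ∧ ((pad - 1 : Nat) : Int) > -1), if_pos hv]
      simp only [hpv]
    · rw [if_neg (by rintro ⟨hv2, -⟩; exact hv hv2), if_neg hv]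
  · rw [if_neg (by omega : ¬ (0 ≤ (pad : Int) + -1 ∧ (pad : Int) + -1 < (node.length : Int)))]
    cases hg : PySem.List.pyGet? node ((pad : Int) - 1) with
    | none => rfl
    | some v =>
      dsimp only
      rw [if_neg (by rintro ⟨-, h2⟩; omega)]

theorem pvLeft2_agree (node : List String) (pad : Nat)
    (hidx : PySem.List.index? node "_" = some pad) :
    pvLeft2 node (pad : Int) = pvStep node (-2) := by
  obtain ⟨hpad, hpv, -⟩ := PySem.List.getElem_of_index?_eq_some hidx
  unfold pvLeft2 pvStep
  rw [hidx]
  dsimp only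
  rw [if_neg (by norm_num : ¬ (0:Int) < -2)]
  by_cases hge : 2 ≤ pad
  · rw [if_pos (⟨by omega, by omega⟩ : 0 ≤ (pad : Int) + -2 ∧ (pad : Int) + -2 < (node.length : Int))]
    have hlt : pad - 2 < node.length := by omega
    rw [show (pad : Int) + -2 = ((pad - 2 : Nat) : Int) by omega,
        show (pad : Int) - 2 = ((pad - 2 : Nat) : Int) by omega,
        PySem.List.pyGet?_natCast, PySem.List.pyGet?_natCast,
        List.getElem?_eq_getElem hlt, List.getElem?_eq_getElem hpad]
    dsimp only
    by_cases hv : node[pad - 2] = ">"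
    · rw [if_pos (⟨hv, by omega⟩ : _ ∧ ((pad - 2 : Nat) : Int) > -1), if_pos hv]
      simp only [hpv]
    · rw [if_neg (by rintro ⟨hv2, -⟩; exact hv hv2), if_neg hv]
  · rw [if_neg (by omega : ¬ (0 ≤ (pad : Int) + -2 ∧ (pad : Int) + -2 < (node.length : Int)))]
    cases hg : PySem.List.pyGet? node ((pad : Int) - 2) with
    | none => rfl
    | some v =>
      dsimp only
      rw [if_neg (by rintro ⟨-, h2⟩; omega)]

theorem pvRight_agree (node : List String) (pad : Nat)
    (hidx : PySem.List.index? node "_" = some pad) :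
    pvRight node (pad : Int) = pvStep node 1 := by
  obtain ⟨hpad, hpv, -⟩ := PySem.List.getElem_of_index?_eq_some hidx
  unfold pvRight pvStep
  rw [hidx]
  dsimp only
  rw [if_pos (by norm_num : (0:Int) < 1)]
  by_cases hle : pad + 1 < node.length
  · rw [if_pos (by omega : (pad : Int) + 1 ≤ (node.length : Int) - 1),
        if_pos (⟨by omega, by omega⟩ : 0 ≤ (pad : Int) + 1 ∧ (pad : Int) + 1 < (node.length : Int))]
    rw [show (pad : Int) + 1 = ((pad + 1 : Nat) : Int) by omega,
        PySem.List.pyGet?_natCast, PySem.List.pyGet?_natCast,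
        List.getElem?_eq_getElem hle, List.getElem?_eq_getElem hpad]
    dsimp only
    by_cases hv : node[pad + 1] = "<"
    · rw [if_pos hv, if_pos hv]
      simp only [hpv]
    · rw [if_neg hv, if_neg hv]
  · rw [if_neg (by omega : ¬ (pad : Int) + 1 ≤ (node.length : Int) - 1),
        if_neg (by omega : ¬ (0 ≤ (pad : Int) + 1 ∧ (pad : Int) + 1 < (node.length : Int)))]

theorem pvRight2_agree (node : List String) (pad : Nat)
    (hidx : PySem.List.index? node "_" = some pad) :
    pvRight2 node (pad : Int) = pvStep node 2 := by
  obtain ⟨hpad, hpv, -⟩ := PySem.List.getElem_of_index?_eq_some hidx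
  unfold pvRight2 pvStep
  rw [hidx]
  dsimp only
  rw [if_pos (by norm_num : (0:Int) < 2)]
  by_cases hle : pad + 2 < node.length
  · rw [if_pos (by omega : (pad : Int) + 2 ≤ (node.length : Int) - 1),
        if_pos (⟨by omega, by omega⟩ : 0 ≤ (pad : Int) + 2 ∧ (pad : Int) + 2 < (node.length : Int))]
    rw [show (pad : Int) + 2 = ((pad + 2 : Nat) : Int) by omega,
        PySem.List.pyGet?_natCast, PySem.List.pyGet?_natCast,
        List.getElem?_eq_getElem hle, List.getElem?_eq_getElem hpad]
    dsimp only
    by_cases hv : node[pad + 2] = "<"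
    · rw [if_pos hv, if_pos hv]
      simp only [hpv]
    · rw [if_neg hv, if_neg hv]
  · rw [if_neg (by omega : ¬ (pad : Int) + 2 ≤ (node.length : Int) - 1),
        if_neg (by omega : ¬ (0 ≤ (pad : Int) + 2 ∧ (pad : Int) + 2 < (node.length : Int)))]

theorem pvMovesA_eq (node : List String) :
    pvMovesA node = ([-1, -2, 1, 2] : List Int).filterMap (pvStep node) := by
  cases hidx : PySem.List.index? node "_" with
  | none =>
    have hidx' : List.idxOf? "_" node = none := by
      rw [← PySem.List.index?_eq_idxOf?]; exact hidx
    have hstep : ∀ d : Int, pvStep node d = none := by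
      intro d
      unfold pvStep
      rw [hidx]
    simp [pvMovesA, PySem.List.index?_eq_idxOf?, hidx', hstep]
  | some pad =>
    have hidx' : List.idxOf? "_" node = some pad := by
      rw [← PySem.List.index?_eq_idxOf?]; exact hidx
    have e1 := pvLeft_agree node pad hidx
    have e2 := pvLeft2_agree node pad hidx
    have e3 := pvRight_agree node pad hidx
    have e4 := pvRight2_agree node pad hidx
    simp only [pvMovesA, PySem.List.index?_eq_idxOf?, hidx', List.foldl,
      List.filterMap_cons, List.filterMap_nil]
    rw [← e1, ← e2, ← e3, ← e4]
    rcases h1 : pvLeft node (pad : Int) with - | c1 <;>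
    rcases h2 : pvLeft2 node (pad : Int) with - | c2 <;>
    rcases h3 : pvRight node (pad : Int) with - | c3 <;>
    rcases h4 : pvRight2 node (pad : Int) with - | c4 <;>
    simp

theorem pvGo_nil (e : List String) (path : List (List String)) :
    pvGo e path [] = none := by
  rw [pvGo]

theorem pvGo_cons (e : List String) (path : List (List String)) (node : List String)
    (d : Int) (rest : List Int) (hn : PySem.List.pyGet? path (-1) = some node) :
    pvGo e path (d :: rest)
      = (match pvStep node d with
         | none => none
         | some nb => pvDfs e (path ++ [nb])).or (pvGo e path rest) := by
  conv_lhs => rw [pvGo]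
  rw [hn]
  split
  · rename_i hs
    simp at hs
  · rename_i nb hs
    obtain rfl : node = nb := Option.some.inj hs
    split
    · rename_i hs2
      rw [hs2]
      simp
    · rename_i nb2 hs2
      rw [hs2]
      dsimp only
      cases hd : pvDfs e (path ++ [nb2]) <;> simp [Option.or]

theorem pv_inner (e : List String) (path : List (List String)) (node : List String)
    (hn : PySem.List.pyGet? path (-1) = some node) :
    ∀ (ds : List Int) (acc : Option (List (List String))),
      ((ds.reverse.filterMap (pvStep node)).map (fun c => path ++ [c])).foldl
        (fun a p => (pvDfs e p).or a) acc = (pvGo e path ds).or acc := by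
  intro ds
  induction ds with
  | nil => intro acc; simp [pvGo_nil]
  | cons d rest ih =>
    intro acc
    rw [List.reverse_cons, List.filterMap_append, List.map_append, List.foldl_append, ih]
    rw [pvGo_cons e path node d rest hn]
    cases hs : pvStep node d with
    | none => simp [hs]
    | some nb =>
      simp only [hs, List.filterMap_cons, List.filterMap_nil, List.map, List.foldl]
      cases hdf : pvDfs e (path ++ [nb]) <;> simp [Option.or]

theorem pvDfs_unfold (e : List String) (path : List (List String)) :
    pvDfs e path
      = match PySem.List.pyGet? path (-1) with
        | none => none
        | some node => if node = e then some path else pvGo e path [2, 1, -2, -1] := by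
  rw [pvDfs]

theorem pv_main_aux (e : List String) :
    ∀ (n : Nat) (q : List (List (List String))), pvQW q ≤ n →
      pvALoop e q = q.foldl (fun acc p => (pvDfs e p).or acc) none := by
  intro n
  induction n with
  | zero =>
    intro q _
    cases q with
    | nil => rw [pvALoop]; rfl
    | cons x xs =>
      exfalso
      have h1 := pvQW_split x xs
      have h2 : 0 < pvPW ((x :: xs).getLastD []) := pvBW_posA _
      omega
  | succ n ih =>
    intro q hq
    cases q with
    | nil => rw [pvALoop]; rfl
    | cons x xs =>
      have hsplit := pv_split (x :: xs) (by simp) ([] : List (List String))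
      have hQ := pvQW_split x xs
      have hPW : 0 < pvPW ((x :: xs).getLastD []) := pvBW_posA _
      rw [pvALoop]
      conv_rhs => rw [hsplit]
      rw [List.foldl_append]
      dsimp only [List.foldl]
      split
      · rename_i hn
        rw [ih ((x :: xs).dropLast) (by omega)]
        rw [pvDfs_unfold, hn]
        simp
      · rename_i node hn
        rw [pvDfs_unfold, hn]
        dsimp only
        by_cases hend : node = e
        · rw [if_pos hend, if_pos hend]
          simp
        · rw [if_neg hend, if_neg hend]
          have hch : pvQW ((x :: xs).dropLast
              ++ (pvMovesA node).map (fun val => (x :: xs).getLastD [] ++ [val])) ≤ n := by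
            rw [pvQW_append, pvQW_children]
            have h2 := pvMovesA_sum node
            have h3 := pvPW_of_last ((x :: xs).getLastD []) node hn
            omega
          rw [ih _ hch, List.foldl_append]
          rw [pvMovesA_eq node]
          rw [show ([-1, -2, 1, 2] : List Int) = ([2, 1, -2, -1] : List Int).reverse by rfl]
          rw [pv_inner e ((x :: xs).getLastD []) node hn [2, 1, -2, -1]]

theorem pv_main (end_swamp : List String) (q : List (List (List String))) :
    pvALoop end_swamp q
      = q.foldl (fun acc p => (pvDfs end_swamp p).or acc) none :=
  pv_main_aux end_swamp (pvQW q) q le_rfl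

-- ===== VERDICT (by name: the statement is the Claim_ definition above) =====
theorem check_possibilites_spec : Claim_equal_check_possibilites := by
  intro swamp end_swamp _ _
  unfold Spec_check_possibilites check_possibilites check_possibilites_alt
  rw [pv_main]
  simp
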